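-- pv_equiv track=rewrite | github.com/kellerja/AoC2019 | day4/part2/solution.py | is_ascending_with_exactly_double_digit
-- ===== SOURCE A (Python) =====
-- def is_ascending_with_exactly_double_digit(num):
--     double_digit = False
--     previous_digit = 0
--     same_digit_count = 1
--     for str_digit in str(num):
--         digit = int(str_digit)
--         if previous_digit > digit:
--             return False
--         elif previous_digit == digit:
--             same_digit_count += 1
--         else:
--             if same_digit_count == 2:
--                 double_digit = True
--             same_digit_count = 1
--         previous_digit = digit
--     return double_digit or same_digit_count == 2
-- ===== SOURCE B (Python) =====
-- def is_ascending_with_exactly_double_digit(num):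
--     # Two independent staged passes over a digit list (the leading zero
--     # sentinel plays the role of A's initial previous_digit): a pairwise
--     # ascending check, then a recursive run-length grouping checked for a
--     # run of length exactly two.
--     digits = [0] + [int(c) for c in str(num)]
--     ascending = all(a <= b for a, b in zip(digits, digits[1:]))
--     return ascending and 2 in run_lengths(digits)
--
--
-- def run_lengths(ds):
--     if not ds:
--         return []
--     same = 0
--     while same < len(ds) - 1 and ds[same + 1] == ds[0]:
--         same += 1
--     return [same + 1] + run_lengths(ds[same + 1:])
-- ===== Notes on version B (the rewrite author's own statement) =====
-- stated objective: alternative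
-- what changed: Replaces the interleaved single-pass state machine (previous digit, run counter, early return) with two independent passes over a digit list built once with a leading zero sentinel: a pairwise ascending check via zip, then a recursive run-length grouping checked for a run of length exactly two.
import Mathlib
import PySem

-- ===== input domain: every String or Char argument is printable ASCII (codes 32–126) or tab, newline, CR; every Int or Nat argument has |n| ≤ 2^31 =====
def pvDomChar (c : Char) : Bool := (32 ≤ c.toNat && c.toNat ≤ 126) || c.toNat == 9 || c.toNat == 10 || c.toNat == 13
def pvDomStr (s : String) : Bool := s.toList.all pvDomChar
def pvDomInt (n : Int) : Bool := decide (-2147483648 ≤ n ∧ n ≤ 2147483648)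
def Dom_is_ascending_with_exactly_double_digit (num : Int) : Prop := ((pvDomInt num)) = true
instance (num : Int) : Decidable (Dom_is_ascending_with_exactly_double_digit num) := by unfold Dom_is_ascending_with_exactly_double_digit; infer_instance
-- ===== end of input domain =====

-- B replaces A's interleaved single-pass state machine by two staged passes over a
-- digit list built once with a leading zero sentinel (a pairwise ascending check,
-- then a recursive run-length grouping); same cost, different decomposition.

-- ===== PORT A =====
-- int(c) for a single character: PySem.Int.ofStr?; the none case (ValueError, e.g.
-- the '-' of a negative number) is excluded by Pre_, the getD 0 is never reached there.
def pvDigitOf (c : Char) : Int := (PySem.Int.ofStr? (String.singleton c)).getD 0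

-- A's loop over str(num): state (double_digit, previous_digit, same_digit_count),
-- early `return False` on a descent.
def pvALoop : List Char → Bool → Int → Int → Bool
  | [], double_digit, _, same_digit_count => double_digit || (same_digit_count == 2)
  | c :: rest, double_digit, previous_digit, same_digit_count =>
    let digit := pvDigitOf c
    if previous_digit > digit then false
    else if previous_digit == digit then
      pvALoop rest double_digit digit (same_digit_count + 1)
    else
      pvALoop rest (if same_digit_count == 2 then true else double_digit) digit 1

def is_ascending_with_exactly_double_digit (num : Int) : Bool :=
  pvALoop (PySem.Int.toStr num).toList false 0 1

-- ===== PORT B =====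
-- run_lengths of Source B: `same` counts the following elements equal to the head,
-- then recurse on the remainder.
def pvRunLengths : List Int → List Nat
  | [] => []
  | d :: rest =>
      let same := (rest.takeWhile (· == d)).length
      (same + 1) :: pvRunLengths (rest.drop same)
termination_by l => l.length
decreasing_by simp

def is_ascending_with_exactly_double_digit_alt (num : Int) : Bool :=
  let digits := 0 :: (PySem.Int.toStr num).toList.map pvDigitOf
  let ascending := (digits.zip (digits.drop 1)).all (fun p => decide (p.1 ≤ p.2))
  ascending && (pvRunLengths digits).contains 2

-- ===== PRECONDITION & SPEC =====
-- Pre_ excludes exactly the negative inputs, where str(num) starts with '-' and A's int('-') raises ValueError.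
def Pre_is_ascending_with_exactly_double_digit (num : Int) : Prop := 0 ≤ num
instance (num : Int) : Decidable (Pre_is_ascending_with_exactly_double_digit num) := by unfold Pre_is_ascending_with_exactly_double_digit; infer_instance
def pvWitness_is_ascending_with_exactly_double_digit : Int := 122

def Spec_is_ascending_with_exactly_double_digit (num : Int) (out : Bool) : Prop := out = is_ascending_with_exactly_double_digit_alt num
instance (num : Int) (out : Bool) : Decidable (Spec_is_ascending_with_exactly_double_digit num out) := by unfold Spec_is_ascending_with_exactly_double_digit; infer_instance

-- ===== CLAIM (what is proved, stated in full; the proofs are below) =====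
def Claim_equal_is_ascending_with_exactly_double_digit : Prop := ∀ (num : Int), Dom_is_ascending_with_exactly_double_digit num → Pre_is_ascending_with_exactly_double_digit num → Spec_is_ascending_with_exactly_double_digit num (is_ascending_with_exactly_double_digit num)

-- ===== LEMMAS AND PROOFS =====

-- the ascending pass of B, named for the proofs
def pvAsc (l : List Int) : Bool := (l.zip (l.drop 1)).all (fun p => decide (p.1 ≤ p.2))

theorem pvAsc_single (a : Int) : pvAsc [a] = true := by simp [pvAsc]

theorem pvAsc_cons2 (a b : Int) (l : List Int) :
    pvAsc (a :: b :: l) = (decide (a ≤ b) && pvAsc (b :: l)) := by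
  simp [pvAsc]

theorem takeWhile_replicate_append_ne (d e : Int) (rest : List Int) (n : Nat) (h : e ≠ d) :
    ((List.replicate n d ++ e :: rest).takeWhile (· == d)) = List.replicate n d := by
  induction n with
  | zero => simp [h]
  | succ k ih => simp [List.replicate_succ, ih]

theorem runLengths_replicate (d : Int) (n : Nat) :
    pvRunLengths (List.replicate (n + 1) d) = [n + 1] := by
  rw [List.replicate_succ, pvRunLengths.eq_2]
  simp [pvRunLengths]

theorem runLengths_replicate_append_ne (d e : Int) (rest : List Int) (n : Nat) (h : e ≠ d) :
    pvRunLengths (List.replicate (n + 1) d ++ e :: rest) = (n + 1) :: pvRunLengths (e :: rest) := by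
  rw [List.replicate_succ, List.cons_append]
  rw [pvRunLengths.eq_2]
  simp only [takeWhile_replicate_append_ne d e rest n h, List.length_replicate]
  rw [List.drop_left' (List.length_replicate)]

theorem replicate_append_same (d : Int) (rest : List Int) (n : Nat) :
    List.replicate (n + 1) d ++ d :: rest = List.replicate (n + 2) d ++ rest := by
  rw [← List.singleton_append, ← List.append_assoc, ← List.replicate_succ']

-- the loop invariant: A's state (dd, prev, n+1) corresponds to B's two passes on
-- the pending run `replicate (n+1) prev` followed by the remaining digits
theorem pvALoop_eq (cs : List Char) : ∀ (dd : Bool) (prev : Int) (n : Nat),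
    pvALoop cs dd prev ((n : Int) + 1) =
      (pvAsc (prev :: cs.map pvDigitOf) &&
        (dd || (pvRunLengths (List.replicate (n + 1) prev ++ cs.map pvDigitOf)).contains 2)) := by
  induction cs with
  | nil =>
    intro dd prev n
    simp only [pvALoop, List.map_nil, List.append_nil, pvAsc_single,
      runLengths_replicate, Bool.true_and]
    have h2 : (((n : Int) + 1) == 2) = decide (n = 1) := by
      by_cases h : n = 1
      · subst h; norm_num
      · have hh : (n : Int) + 1 ≠ 2 := by omega
        simp [h, hh]
    simp [h2]
  | cons c rest ih =>
    intro dd prev n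
    rw [show ((pvALoop (c :: rest) dd prev ((n : Int) + 1)) =
      (let digit := pvDigitOf c;
       if prev > digit then false
       else if prev == digit then pvALoop rest dd digit (((n : Int) + 1) + 1)
       else pvALoop rest (if ((n : Int) + 1) == 2 then true else dd) digit 1)) from rfl]
    simp only [List.map_cons]
    by_cases hgt : prev > pvDigitOf c
    · simp [hgt, pvAsc_cons2, show ¬ prev ≤ pvDigitOf c by omega]
    · simp only [hgt, if_false]
      by_cases heq : prev = pvDigitOf c
      · have h2 : ((n : Int) + 1) + 1 = ((n + 1 : Nat) : Int) + 1 := by push_cast; ring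
        simp only [heq, beq_self_eq_true, if_true, h2, ih]
        rw [← heq, replicate_append_same, pvAsc_cons2, heq]
        simp
      · have hne : pvDigitOf c ≠ prev := fun h => heq h.symm
        have hb : (prev == pvDigitOf c) = false := by simp [heq]
        rw [hb]
        simp only [Bool.false_eq_true, if_false]
        rw [show (1 : Int) = ((0 : Nat) : Int) + 1 from by norm_num, ih]
        rw [runLengths_replicate_append_ne _ _ _ _ hne]
        have hle : prev ≤ pvDigitOf c := by omega
        have hsw : (decide ((n : Int) + 1 = 2)) = ((2 : Nat) == n + 1) := by
          by_cases h : n = 1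
          · subst h; norm_num
          · have hh : (n : Int) + 1 ≠ 2 := by omega
            have h2 : (2 : Nat) ≠ n + 1 := by omega
            simp [hh, h]
        simp only [pvAsc_cons2, hle, decide_true, Bool.true_and, List.contains_cons]
        cases dd <;> simp [hsw]

-- ===== VERDICT (by name: the statement is the Claim_ definition above) =====
theorem is_ascending_with_exactly_double_digit_spec : Claim_equal_is_ascending_with_exactly_double_digit := by
  intro num _ _
  show _ = _
  rw [is_ascending_with_exactly_double_digit, is_ascending_with_exactly_double_digit_alt]
  have h1 : (1 : Int) = ((0 : Nat) : Int) + 1 := by norm_num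
  rw [h1, pvALoop_eq]
  simp [pvAsc]
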